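-- pv_equiv track=rewrite | github.com/maynoirfan/Youtube-MP3-Downloader | server.py | clean_youtube_url
-- ===== SOURCE A (Python) =====
-- def clean_youtube_url(url):
--     url = url.strip()
--     for param in ['&list=', '&index=', '&t=', '?si=', '&pp=', '&ab_channel=', '&feature=']:
--         if param in url:
--             url = url.split(param)[0]
--     if 'youtu.be/' in url:
--         vid = url.split('youtu.be/')[-1].split('?')[0].split('&')[0]
--         url = f"https://www.youtube.com/watch?v={vid}"
--     return url
-- ===== SOURCE B (Python) =====
-- def _cut_at_first(s, seps):
--     """Return s truncated at the leftmost first occurrence of any sep (s unchanged if none occurs)."""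
--     best = len(s)
--     for sep in seps:
--         k = s.find(sep)
--         if k != -1 and k < best:
--             best = k
--     return s[:best]
--
--
-- def clean_youtube_url(url):
--     url = _cut_at_first(url.strip(),
--                         ['&list=', '&index=', '&t=', '?si=', '&pp=', '&ab_channel=', '&feature='])
--     pos = url.rfind('youtu.be/')
--     if pos != -1:
--         vid = _cut_at_first(url[pos + 9:], ['?', '&'])
--         url = 'https://www.youtube.com/watch?v=' + vid
--     return url
-- ===== Notes on version B (the rewrite author's own statement) =====
-- stated objective: alternative
-- what changed: A's guarded split-and-reassign loop and its three-way split chain for the video id are replaced by a shared cut-at-first helper (minimum over find indices, one slice) applied to the tracking-parameter list and to the tail located by a single rfind; the rfind formulation agrees with taking the last split chunk because the separator cannot overlap itself.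
import Mathlib
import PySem

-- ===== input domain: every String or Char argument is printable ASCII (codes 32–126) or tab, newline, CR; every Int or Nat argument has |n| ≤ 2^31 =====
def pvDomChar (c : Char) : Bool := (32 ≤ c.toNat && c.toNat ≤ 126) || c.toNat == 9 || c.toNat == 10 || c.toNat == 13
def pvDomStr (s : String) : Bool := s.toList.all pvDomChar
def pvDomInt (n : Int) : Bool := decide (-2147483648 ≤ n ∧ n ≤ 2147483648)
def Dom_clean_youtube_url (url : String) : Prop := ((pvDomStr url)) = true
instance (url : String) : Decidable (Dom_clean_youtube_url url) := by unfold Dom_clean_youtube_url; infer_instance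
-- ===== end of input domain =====

-- B replaces A's guarded split-and-reassign loop and its split[-1]/split/split chain by one shared
-- cut-at-first-separator helper plus a single rfind locating the video id; same results, same cost.

-- ===== PORT A =====
-- the tracking-parameter list both Pythons carry verbatim
def pvParams : List String :=
  ["&list=", "&index=", "&t=", "?si=", "&pp=", "&ab_channel=", "&feature="]

-- port of A; url.split(sep)[0] / [-1]: split? is `some` (every sep here is non-empty) and the split list
-- is never empty, so the .getD/.headD defaults are unreachable
def clean_youtube_url (url : String) : String :=
  let u0 := PySem.Str.strip url
  let u1 := pvParams.foldl (fun u param =>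
      if PySem.Str.isIn param u then ((PySem.Str.split? u param).getD []).headD "" else u) u0
  if PySem.Str.isIn "youtu.be/" u1 then
    let last := (PySem.List.pyGet? ((PySem.Str.split? u1 "youtu.be/").getD []) (-1)).getD ""
    let vid1 := ((PySem.Str.split? last "?").getD []).headD ""
    let vid := ((PySem.Str.split? vid1 "&").getD []).headD ""
    "https://www.youtube.com/watch?v=" ++ vid
  else u1

-- ===== PORT B =====
-- Source B's _cut_at_first: best = len(s); for sep: k = s.find(sep); if k != -1 and k < best: best = k; return s[:best]
def pvCutAtFirst (s : String) (seps : List String) : String :=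
  let best := seps.foldl (fun best sep =>
      let k := PySem.Str.find s sep
      if k != -1 && decide (k < best) then k else best) (PySem.Str.len s)
  PySem.Str.slice s none (some best)

def clean_youtube_url_alt (url : String) : String :=
  let u := pvCutAtFirst (PySem.Str.strip url) pvParams
  let pos := PySem.Str.rfind u "youtu.be/"
  if pos != -1 then
    let vid := pvCutAtFirst (PySem.Str.slice u (some (pos + 9)) none) ["?", "&"]
    "https://www.youtube.com/watch?v=" ++ vid
  else u

-- ===== PRECONDITION & SPEC =====
def Spec_clean_youtube_url (url : String) (out : String) : Prop := out = clean_youtube_url_alt url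
instance (url : String) (out : String) : Decidable (Spec_clean_youtube_url url out) := by unfold Spec_clean_youtube_url; infer_instance

-- ===== CLAIM (what is proved, stated in full; the proofs are below) =====
def Claim_equal_clean_youtube_url : Prop := ∀ (url : String), Dom_clean_youtube_url url → Spec_clean_youtube_url url (clean_youtube_url url)

-- ===== LEMMAS AND PROOFS =====

-- cut s at the first occurrence of q (identity when q does not occur)
def pvCut (s q : List Char) : List Char :=
  if 0 ≤ PySem.Chars.find s q then s.take (PySem.Chars.find s q).toNat else s

-- the least first-occurrence index of any q ∈ qs in s (s.length when none occurs)
def pvF (s : List Char) (qs : List (List Char)) : Nat :=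
  qs.foldr (fun q acc =>
    if 0 ≤ PySem.Chars.find s q then min (PySem.Chars.find s q).toNat acc else acc) s.length

-- no character of q at position ≥ 1 equals the first character of p
def PvCompat (p q : List Char) : Prop :=
  ∀ m : Nat, m < q.length → 1 ≤ m → q.getD m ' ' ≠ p.headD ' '

-- p cannot overlap itself: no proper nonempty suffix-start of p is a prefix of p
def PvNoBorder (p : List Char) : Prop :=
  ∀ d : Nat, d < p.length → 1 ≤ d → ¬ p.drop d <+: p

theorem pv_find_eq (s q : List Char) (k : Nat) (h1 : q <+: s.drop k)
    (h2 : ∀ i, i < k → ¬ q <+: s.drop i) : PySem.Chars.find s q = (k : Int) := by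
  have hinf : q <:+: s := by
    obtain ⟨t, ht⟩ := h1
    exact ⟨s.take k, t, by rw [List.append_assoc, ht, List.take_append_drop]⟩
  have h0 : 0 ≤ PySem.Chars.find s q := (PySem.Chars.find_nonneg_iff s q).mpr hinf
  obtain ⟨hocc, hmin⟩ := PySem.Chars.find_spec h0
  rcases lt_trichotomy (PySem.Chars.find s q).toNat k with hlt | heq | hgt
  · exact absurd hocc (h2 _ hlt)
  · omega
  · exact absurd h1 (hmin k hgt)

theorem pv_occ_take (s q : List Char) (i j : Nat) (hq : q ≠ []) :
    q <+: (s.take j).drop i ↔ q <+: s.drop i ∧ i + q.length ≤ j := by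
  have hql : 0 < q.length := List.length_pos_of_ne_nil hq
  rw [List.drop_take, List.prefix_take_iff]
  constructor
  · rintro ⟨a, b⟩; exact ⟨a, by omega⟩
  · rintro ⟨a, b⟩; exact ⟨a, by omega⟩

theorem pv_find_take_eq (s q : List Char) (j : Nat) (hq : q ≠ [])
    (h : 0 ≤ PySem.Chars.find s q) (hfit : (PySem.Chars.find s q).toNat + q.length ≤ j) :
    PySem.Chars.find (s.take j) q = PySem.Chars.find s q := by
  obtain ⟨hocc, hmin⟩ := PySem.Chars.find_spec h
  have := pv_find_eq (s.take j) q (PySem.Chars.find s q).toNat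
    ((pv_occ_take s q _ j hq).mpr ⟨hocc, hfit⟩)
    (fun i hi hpre => hmin i hi ((pv_occ_take s q i j hq).mp hpre).1)
  omega

theorem pv_find_take_neg (s q : List Char) (j : Nat) (hq : q ≠ [])
    (h : ∀ i, q <+: s.drop i → ¬ (i + q.length ≤ j)) :
    PySem.Chars.find (s.take j) q = -1 := by
  rw [PySem.Chars.find_eq_neg_one_iff]
  intro hinf
  obtain ⟨i, hocc⟩ := (PySem.Chars.exists_prefix_drop_iff_isIn q (s.take j)).mpr
    ((PySem.Chars.isIn_iff_infix q (s.take j)).mpr hinf)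
  obtain ⟨h1, h2⟩ := (pv_occ_take s q i j hq).mp hocc
  exact h i h1 h2

theorem pv_fit (s p q : List Char) (i j : Nat) (hp : p <+: s.drop j) (hpne : p ≠ [])
    (hqq : q <+: s.drop i) (hij : i < j) (hc : PvCompat p q) : i + q.length ≤ j := by
  by_contra hcon
  have hm1 : j - i < q.length := by omega
  have hm2 : 1 ≤ j - i := by omega
  apply hc (j - i) hm1 hm2
  have hpl : 0 < p.length := List.length_pos_of_ne_nil hpne
  have hjlen : j < s.length := by
    have := hp.length_le; simp only [List.length_drop] at this; omega
  have hq1 : q.getD (j - i) ' ' = s[j]'hjlen := by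
    rw [List.getD_eq_getElem q ' ' hm1, hqq.getElem hm1]
    rw [List.getElem_drop]
    congr 1; omega
  have hp1 : p.headD ' ' = s[j]'hjlen := by
    have h0 : 0 < p.length := hpl
    have := hp.getElem (i := 0) h0
    rw [List.getElem_drop] at this
    cases p with
    | nil => exact absurd rfl hpne
    | cons a t => simpa using this
  rw [hq1, hp1]

theorem pvF_nil (s : List Char) : pvF s [] = s.length := rfl

theorem pvF_cons (s q : List Char) (qs : List (List Char)) :
    pvF s (q :: qs) = if 0 ≤ PySem.Chars.find s q then
      min (PySem.Chars.find s q).toNat (pvF s qs) else pvF s qs := rfl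

theorem pv_F_le (s : List Char) (qs : List (List Char)) : pvF s qs ≤ s.length := by
  induction qs with
  | nil => simp [pvF_nil]
  | cons q qs ih =>
    rw [pvF_cons]
    split <;> omega

theorem pv_F_take (s p : List Char) (j : Nat) (qs : List (List Char))
    (hpne : p ≠ []) (hj : j ≤ s.length) (hocc : j = s.length ∨ p <+: s.drop j)
    (hq : ∀ q ∈ qs, q ≠ [] ∧ PvCompat p q) :
    min (pvF (s.take j) qs) j = min (pvF s qs) j := by
  induction qs with
  | nil => simp only [pvF_nil, List.length_take]; omega
  | cons q qs ih =>
    obtain ⟨hqne, hqc⟩ := hq q (by simp)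
    have ih' := ih (fun r hr => hq r (by simp [hr]))
    have hql : 0 < q.length := List.length_pos_of_ne_nil hqne
    rw [pvF_cons, pvF_cons]
    by_cases h0 : 0 ≤ PySem.Chars.find s q
    · have hispec := PySem.Chars.find_spec (s := s) (sub := q) h0
      by_cases hfit : (PySem.Chars.find s q).toNat + q.length ≤ j
      · rw [pv_find_take_eq s q j hqne h0 hfit, if_pos h0, if_pos h0]
        omega
      · have hji : j ≤ (PySem.Chars.find s q).toNat := by
          by_contra hcon
          rcases hocc with hlen | hpj
          · have hle := hispec.1.length_le
            simp only [List.length_drop] at hle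
            omega
          · exact hfit (pv_fit s p q _ j hpj hpne hispec.1 (by omega) hqc)
        have hneg : PySem.Chars.find (s.take j) q = -1 := by
          apply pv_find_take_neg s q j hqne
          intro i' hocc' hle
          have : ¬ i' < (PySem.Chars.find s q).toNat := fun hlt => hispec.2 i' hlt hocc'
          omega
        rw [hneg, if_neg (by norm_num), if_pos h0]
        omega
    · have hneg : PySem.Chars.find (s.take j) q = -1 := by
        apply pv_find_take_neg s q j hqne
        intro i' hocc' _
        exact h0 ((PySem.Chars.find_nonneg_iff s q).mpr
          ((PySem.Chars.isIn_iff_infix q s).mp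
            ((PySem.Chars.exists_prefix_drop_iff_isIn q s).mp ⟨i', hocc'⟩)))
      rw [hneg, if_neg (by norm_num), if_neg h0]
      exact ih'

theorem pv_loop_take (qs : List (List Char))
    (hne : ∀ q ∈ qs, q ≠ []) (hc : ∀ p ∈ qs, ∀ q ∈ qs, PvCompat p q) :
    ∀ s : List Char, qs.foldl pvCut s = s.take (pvF s qs) := by
  induction qs with
  | nil => intro s; simp [pvF_nil]
  | cons p qs ih =>
    intro s
    have hpne : p ≠ [] := hne p (by simp)
    have hfle : pvF s qs ≤ s.length := pv_F_le s qs
    by_cases h0 : 0 ≤ PySem.Chars.find s p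
    · have hspec := PySem.Chars.find_spec (s := s) (sub := p) h0
      have hjle : (PySem.Chars.find s p).toNat ≤ s.length := by
        have := PySem.Chars.find_le_length s p; omega
      have hcut : pvCut s p = s.take (PySem.Chars.find s p).toNat := by
        unfold pvCut; rw [if_pos h0]
      have hmin := pv_F_take s p (PySem.Chars.find s p).toNat qs hpne hjle (Or.inr hspec.1)
        (fun r hr => ⟨hne r (by simp [hr]), hc p (by simp) r (by simp [hr])⟩)
      calc (p :: qs).foldl pvCut s = qs.foldl pvCut (pvCut s p) := by rw [List.foldl_cons]
        _ = (pvCut s p).take (pvF (pvCut s p) qs) :=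
            ih (fun r hr => hne r (by simp [hr]))
              (fun a ha b hb => hc a (by simp [ha]) b (by simp [hb])) _
        _ = s.take (min (pvF (s.take (PySem.Chars.find s p).toNat) qs)
              (PySem.Chars.find s p).toNat) := by rw [hcut, List.take_take]
        _ = s.take (pvF s (p :: qs)) := by
            rw [pvF_cons, if_pos h0]
            congr 1
            omega
    · have hcut : pvCut s p = s := by unfold pvCut; rw [if_neg h0]
      calc (p :: qs).foldl pvCut s = qs.foldl pvCut s := by rw [List.foldl_cons, hcut]
        _ = s.take (pvF s qs) :=
            ih (fun r hr => hne r (by simp [hr]))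
              (fun a ha b hb => hc a (by simp [ha]) b (by simp [hb])) _
        _ = s.take (pvF s (p :: qs)) := by rw [pvF_cons, if_neg h0]

theorem pv_cut_nil (sep : List Char) (hsep : sep ≠ []) : pvCut [] sep = [] := by
  have h : ¬ (0 ≤ PySem.Chars.find [] sep) := fun h0 =>
    hsep (by simpa using (PySem.Chars.find_nonneg_iff [] sep).mp h0)
  unfold pvCut
  rw [if_neg h]

theorem pv_cut_prefix (l sep : List Char) (hp : sep <+: l) : pvCut l sep = [] := by
  have h0 : PySem.Chars.find l sep = 0 :=
    pv_find_eq l sep 0 (by simpa using hp) (fun i hi => by omega)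
  unfold pvCut
  rw [h0]
  simp

theorem pv_cut_cons (c : Char) (rest sep : List Char) (_hsep : sep ≠ [])
    (hnp : ¬ sep <+: (c :: rest)) : pvCut (c :: rest) sep = c :: pvCut rest sep := by
  by_cases hs : sep <:+: rest
  · have h0 : 0 ≤ PySem.Chars.find rest sep := (PySem.Chars.find_nonneg_iff rest sep).mpr hs
    obtain ⟨hocc, hmin⟩ := PySem.Chars.find_spec h0
    have hfc : PySem.Chars.find (c :: rest) sep = ((PySem.Chars.find rest sep).toNat + 1 : Nat) := by
      apply pv_find_eq
      · simpa using hocc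
      · intro i hi
        cases i with
        | zero => simpa using hnp
        | succ i' => exact fun hpre => hmin i' (by omega) (by simpa using hpre)
    unfold pvCut
    rw [hfc, if_pos (by positivity), if_pos h0]
    simp only [Int.toNat_natCast, List.take_succ_cons]
  · have hnc : ¬ sep <:+: (c :: rest) := by
      rw [List.infix_cons_iff]
      rintro (h | h)
      · exact hnp h
      · exact hs h
    unfold pvCut
    rw [if_neg, if_neg]
    · exact fun h0 => hs ((PySem.Chars.find_nonneg_iff rest sep).mp h0)
    · exact fun h0 => hnc ((PySem.Chars.find_nonneg_iff (c :: rest) sep).mp h0)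

theorem pv_go (sep : List Char) (hsep : sep ≠ []) :
    ∀ (fuel : Nat) (l cur : List Char) (acc : List (List Char)), l.length < fuel →
      ∃ tl, PySem.Chars.splitOn.go sep fuel l cur acc
        = acc.reverse ++ (cur.reverse ++ pvCut l sep) :: tl := by
  intro fuel
  induction fuel with
  | zero => intro l cur acc h; omega
  | succ f ih =>
    intro l cur acc hlen
    cases l with
    | nil =>
      refine ⟨[], ?_⟩
      rw [PySem.Chars.splitOn.go]
      · rw [pv_cut_nil sep hsep]
        simp
      · omega
    | cons c rest =>
      rw [PySem.Chars.splitOn.go]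
      by_cases hp : sep.isPrefixOf (c :: rest)
      · rw [if_pos hp]
        have hple : 0 < sep.length := List.length_pos_of_ne_nil hsep
        obtain ⟨tl, htl⟩ := ih ((c :: rest).drop sep.length) [] (cur.reverse :: acc)
          (by simp only [List.length_drop, List.length_cons]
              simp only [List.length_cons] at hlen; omega)
        refine ⟨pvCut ((c :: rest).drop sep.length) sep :: tl, ?_⟩
        rw [htl, pv_cut_prefix _ _ (List.isPrefixOf_iff_prefix.mp hp)]
        simp
      · rw [if_neg hp]
        obtain ⟨tl, htl⟩ := ih rest (c :: cur) acc (by simp at hlen ⊢; omega)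
        refine ⟨tl, ?_⟩
        rw [htl, pv_cut_cons c rest sep hsep (fun h => hp (List.isPrefixOf_iff_prefix.mpr h))]
        simp

theorem pv_splitOn_head (s sep : List Char) (hsep : sep ≠ []) :
    ∃ tl, PySem.Chars.splitOn s sep = pvCut s sep :: tl := by
  obtain ⟨tl, htl⟩ := pv_go sep hsep (s.length + 1) s [] [] (by omega)
  refine ⟨tl, ?_⟩
  unfold PySem.Chars.splitOn
  rw [htl]
  simp

theorem pv_split_head (u p : String) (hp : p.toList ≠ []) :
    ((PySem.Str.split? u p).getD []).headD "" = String.ofList (pvCut u.toList p.toList) := by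
  obtain ⟨tl, htl⟩ := pv_splitOn_head u.toList p.toList hp
  rw [PySem.Str.split?.eq_1]
  unfold PySem.Chars.split?
  rw [if_neg (by simpa using hp), htl]
  simp

theorem pv_step_string (u p : String) (hp : p.toList ≠ []) :
    (if PySem.Str.isIn p u then ((PySem.Str.split? u p).getD []).headD "" else u)
      = String.ofList (pvCut u.toList p.toList) := by
  by_cases h : PySem.Str.isIn p u
  · rw [if_pos h]
    exact pv_split_head u p hp
  · rw [if_neg h]
    have hni : ¬ p.toList <:+: u.toList := by
      intro hinf
      exact h ((PySem.Str.isIn_iff_infix p u).mpr hinf)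
    have hneg : ¬ (0 ≤ PySem.Chars.find u.toList p.toList) := fun h0 =>
      hni ((PySem.Chars.find_nonneg_iff _ _).mp h0)
    unfold pvCut
    rw [if_neg hneg, String.ofList_toList]

theorem pv_foldl_string (ps : List String) (hne : ∀ p ∈ ps, p.toList ≠ []) (u : String) :
    ps.foldl (fun u param =>
        if PySem.Str.isIn param u then ((PySem.Str.split? u param).getD []).headD "" else u) u
      = String.ofList ((ps.map String.toList).foldl pvCut u.toList) := by
  induction ps generalizing u with
  | nil => simp [String.ofList_toList]
  | cons p ps ih =>
    rw [List.map_cons, List.foldl_cons, List.foldl_cons]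
    rw [pv_step_string u p (hne p (by simp))]
    rw [ih (fun r hr => hne r (by simp [hr]))]
    rw [String.toList_ofList]

theorem pv_compat_params :
    ∀ p ∈ pvParams.map String.toList, ∀ q ∈ pvParams.map String.toList, PvCompat p q := by
  simp only [PvCompat]
  decide

theorem pv_ne_params : ∀ q ∈ pvParams.map String.toList, q ≠ [] := by decide

-- ---- B's cut-at-first fold computes pvF ----

theorem pv_best_eq (s : String) (seps : List String) :
    ∀ b : Int, 0 ≤ b → b ≤ (s.toList.length : Int) →
      seps.foldl (fun best sep =>
          if PySem.Str.find s sep != -1 && decide (PySem.Str.find s sep < best)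
          then PySem.Str.find s sep else best) b
        = min b ((pvF s.toList (seps.map String.toList) : Nat) : Int) := by
  induction seps with
  | nil =>
    intro b hb0 hble
    rw [List.map_nil, pvF_nil, List.foldl_nil]
    omega
  | cons q qs ih =>
    intro b hb0 hble
    rw [List.foldl_cons, List.map_cons, pvF_cons]
    have hqe : PySem.Str.find s q = PySem.Chars.find s.toList q.toList := PySem.Str.find_eq s q
    have hge : -1 ≤ PySem.Str.find s q := by
      rw [hqe]; exact PySem.Chars.neg_one_le_find _ _
    have hle : PySem.Str.find s q ≤ (s.toList.length : Int) := by
      rw [hqe]; exact PySem.Chars.find_le_length _ _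
    have hFle : pvF s.toList (qs.map String.toList) ≤ s.toList.length := pv_F_le _ _
    by_cases h0 : 0 ≤ PySem.Str.find s q
    · rw [if_pos (show 0 ≤ PySem.Chars.find s.toList q.toList by omega)]
      by_cases hlt : PySem.Str.find s q < b
      · rw [if_pos (by simp; omega)]
        rw [ih _ h0 hle]
        rw [hqe] at *
        omega
      · rw [if_neg (by simp; omega)]
        rw [ih b hb0 hble]
        rw [hqe] at *
        omega
    · rw [if_neg (show ¬ 0 ≤ PySem.Chars.find s.toList q.toList by omega),
          if_neg (by simp; omega)]
      rw [ih b hb0 hble]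

theorem pv_cutAtFirst_eq (s : String) (seps : List String) :
    pvCutAtFirst s seps
      = String.ofList (s.toList.take (pvF s.toList (seps.map String.toList))) := by
  have hFle : pvF s.toList (seps.map String.toList) ≤ s.toList.length := pv_F_le _ _
  simp only [pvCutAtFirst, PySem.Str.len_eq]
  rw [pv_best_eq s seps (s.toList.length : Int) (by positivity) le_rfl]
  have hmin : min (s.toList.length : Int) ((pvF s.toList (seps.map String.toList) : Nat) : Int)
      = ((pvF s.toList (seps.map String.toList) : Nat) : Int) := by omega
  rw [hmin]
  have htl : (PySem.Str.slice s none (some ((pvF s.toList (seps.map String.toList) : Nat) : Int))).toList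
      = s.toList.take (pvF s.toList (seps.map String.toList)) := by
    rw [PySem.Str.toList_slice, PySem.Chars.slice_eq_listSlice,
      PySem.List.slice_to _ (by positivity)]
    simp
  calc PySem.Str.slice s none (some ((pvF s.toList (seps.map String.toList) : Nat) : Int))
      = String.ofList (PySem.Str.slice s none
          (some ((pvF s.toList (seps.map String.toList) : Nat) : Int))).toList := by
        rw [String.ofList_toList]
    _ = String.ofList (s.toList.take (pvF s.toList (seps.map String.toList))) := by rw [htl]

-- ---- rfind: specification ----

theorem pv_rgo_zero (s sub : List Char) :
    PySem.Chars.rfind.go s sub 0 = if sub.isPrefixOf s then 0 else -1 := by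
  rw [PySem.Chars.rfind.go]

theorem pv_rgo_succ (s sub : List Char) (j : Nat) :
    PySem.Chars.rfind.go s sub (j + 1)
      = if sub.isPrefixOf (s.drop (j + 1)) then ((j : Int) + 1) else PySem.Chars.rfind.go s sub j := by
  rw [PySem.Chars.rfind.go]
  split <;> simp

theorem pv_rgo_spec (s sub : List Char) : ∀ k : Nat,
    -1 ≤ PySem.Chars.rfind.go s sub k ∧
    (0 ≤ PySem.Chars.rfind.go s sub k →
      sub <+: s.drop (PySem.Chars.rfind.go s sub k).toNat ∧
      (PySem.Chars.rfind.go s sub k).toNat ≤ k ∧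
      ∀ j, (PySem.Chars.rfind.go s sub k).toNat < j → j ≤ k → ¬ sub <+: s.drop j) ∧
    (PySem.Chars.rfind.go s sub k = -1 → ∀ j ≤ k, ¬ sub <+: s.drop j) := by
  intro k
  induction k with
  | zero =>
    rw [pv_rgo_zero]
    by_cases hp : sub.isPrefixOf s
    · rw [if_pos hp]
      refine ⟨by norm_num, fun _ => ⟨by simpa using List.isPrefixOf_iff_prefix.mp hp, by omega,
        fun j hj1 hj2 => by omega⟩, fun h => by norm_num at h⟩
    · rw [if_neg hp]
      refine ⟨le_rfl, fun h => by norm_num at h, fun _ j hj => ?_⟩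
      interval_cases j
      simpa using fun h => hp (List.isPrefixOf_iff_prefix.mpr h)
  | succ j ih =>
    obtain ⟨ih1, ih2, ih3⟩ := ih
    rw [pv_rgo_succ]
    by_cases hp : sub.isPrefixOf (s.drop (j + 1))
    · rw [if_pos hp]
      refine ⟨by omega, fun _ => ?_, fun h => by omega⟩
      have : ((j : Int) + 1).toNat = j + 1 := by omega
      rw [this]
      exact ⟨List.isPrefixOf_iff_prefix.mp hp, le_rfl, fun j' h1 h2 => by omega⟩
    · rw [if_neg hp]
      have hnp : ¬ sub <+: s.drop (j + 1) := fun h => hp (List.isPrefixOf_iff_prefix.mpr h)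
      refine ⟨ih1, fun h0 => ?_, fun hm1 j' hj' => ?_⟩
      · obtain ⟨a, b, c⟩ := ih2 h0
        refine ⟨a, by omega, fun j' h1 h2 => ?_⟩
        rcases Nat.lt_or_ge j' (j + 1) with h | h
        · exact c j' h1 (by omega)
        · have : j' = j + 1 := by omega
          rw [this]; exact hnp
      · rcases Nat.lt_or_ge j' (j + 1) with h | h
        · exact ih3 hm1 j' (by omega)
        · have : j' = j + 1 := by omega
          rw [this]; exact hnp

theorem pv_rfind_spec (s sub : List Char) (hsub : sub ≠ [])
    (h : 0 ≤ PySem.Chars.rfind s sub) :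
    sub <+: s.drop (PySem.Chars.rfind s sub).toNat ∧
    ∀ j, (PySem.Chars.rfind s sub).toNat < j → ¬ sub <+: s.drop j := by
  have hspec := pv_rgo_spec s sub s.length
  unfold PySem.Chars.rfind at h ⊢
  obtain ⟨a, b, c⟩ := hspec.2.1 h
  refine ⟨a, fun j hj hpre => ?_⟩
  by_cases hle : j ≤ s.length
  · exact c j hj hle hpre
  · have : s.drop j = [] := List.drop_eq_nil_of_le (by omega)
    rw [this] at hpre
    exact hsub (List.prefix_nil.mp hpre)

theorem pv_rfind_neg_one_le (s sub : List Char) : -1 ≤ PySem.Chars.rfind s sub :=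
  (pv_rgo_spec s sub s.length).1

theorem pv_rfind_neg_iff (s sub : List Char) (hsub : sub ≠ []) :
    PySem.Chars.rfind s sub = -1 ↔ ¬ sub <:+: s := by
  constructor
  · intro hm1 hinf
    obtain ⟨j, hj⟩ := (PySem.Chars.exists_prefix_drop_iff_isIn sub s).mpr
      ((PySem.Chars.isIn_iff_infix sub s).mpr hinf)
    by_cases hle : j ≤ s.length
    · exact (pv_rgo_spec s sub s.length).2.2 hm1 j hle hj
    · have : s.drop j = [] := List.drop_eq_nil_of_le (by omega)
      rw [this] at hj
      exact hsub (List.prefix_nil.mp hj)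
  · intro hni
    by_contra hne
    have h0 : 0 ≤ PySem.Chars.rfind s sub := by
      have := pv_rfind_neg_one_le s sub; omega
    obtain ⟨hocc, _⟩ := pv_rfind_spec s sub hsub h0
    exact hni ((PySem.Chars.isIn_iff_infix sub s).mp
      ((PySem.Chars.exists_prefix_drop_iff_isIn sub s).mp ⟨_, hocc⟩))

theorem pv_rfind_nonneg_iff (s sub : List Char) (hsub : sub ≠ []) :
    0 ≤ PySem.Chars.rfind s sub ↔ sub <:+: s := by
  have h1 := pv_rfind_neg_one_le s sub
  rw [← not_iff_not, ← pv_rfind_neg_iff s sub hsub]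
  constructor <;> intro h <;> omega

theorem pv_rfind_eq (s sub : List Char) (m : Nat) (hsub : sub ≠ [])
    (h1 : sub <+: s.drop m) (h2 : ∀ j, m < j → ¬ sub <+: s.drop j) :
    PySem.Chars.rfind s sub = (m : Int) := by
  have hinf : sub <:+: s := by
    obtain ⟨t, ht⟩ := h1
    exact ⟨s.take m, t, by rw [List.append_assoc, ht, List.take_append_drop]⟩
  have h0 : 0 ≤ PySem.Chars.rfind s sub := (pv_rfind_nonneg_iff s sub hsub).mpr hinf
  obtain ⟨hocc, hmax⟩ := pv_rfind_spec s sub hsub h0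
  rcases lt_trichotomy (PySem.Chars.rfind s sub).toNat m with hlt | heq | hgt
  · exact absurd h1 (hmax m hlt)
  · omega
  · exact absurd hocc (h2 _ hgt)

-- two occurrences at distance d < |p| force a border of p
theorem pv_overlap (s p : List Char) (i d : Nat) (hd : 1 ≤ d) (hdl : d < p.length)
    (h1 : p <+: s.drop i) (h2 : p <+: s.drop (i + d)) : p.drop d <+: p := by
  have hlen2 : i + d + p.length ≤ s.length := by
    have := h2.length_le; simp only [List.length_drop] at this; omega
  rw [List.prefix_iff_eq_take]
  apply List.ext_getElem
  · simp only [List.length_drop, List.length_take]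
    omega
  · intro m hm1 hm2
    simp only [List.getElem_drop, List.getElem_take]
    have hmd : m < p.length - d := by simpa using hm1
    have e1 : p[d + m]'(by omega) = s[i + (d + m)]'(by omega) := by
      have := h1.getElem (i := d + m) (by omega)
      rw [List.getElem_drop] at this
      exact this
    have e2 : p[m]'(by omega) = s[i + d + m]'(by omega) := by
      have := h2.getElem (i := m) (by omega)
      rw [List.getElem_drop] at this
      exact this
    rw [e1, e2]
    congr 1
    omega

-- the last chunk of splitOn: suffix after the rightmost occurrence (for a border-free separator)
theorem pv_go_last (sep : List Char) (hsep : sep ≠ []) (hnb : PvNoBorder sep) :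
    ∀ (fuel : Nat) (l cur : List Char) (acc : List (List Char)), l.length < fuel →
      (PySem.Chars.splitOn.go sep fuel l cur acc).getLast?
        = some (if 0 ≤ PySem.Chars.rfind l sep
            then l.drop ((PySem.Chars.rfind l sep).toNat + sep.length)
            else cur.reverse ++ l) := by
  have hsl : 0 < sep.length := List.length_pos_of_ne_nil hsep
  intro fuel
  induction fuel with
  | zero => intro l cur acc h; omega
  | succ f ih =>
    intro l cur acc hlen
    cases l with
    | nil =>
      rw [PySem.Chars.splitOn.go]
      · have hneg : PySem.Chars.rfind ([] : List Char) sep = -1 :=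
          (pv_rfind_neg_iff [] sep hsep).mpr (fun h => hsep (List.infix_nil.mp h))
        rw [hneg, if_neg (by norm_num)]
        simp
      · omega
    | cons c rest =>
      rw [PySem.Chars.splitOn.go]
      by_cases hp : sep.isPrefixOf (c :: rest)
      · rw [if_pos hp]
        have hppre : sep <+: (c :: rest) := List.isPrefixOf_iff_prefix.mp hp
        have hrec := ih ((c :: rest).drop sep.length) [] (cur.reverse :: acc)
          (by simp only [List.length_drop, List.length_cons]
              simp only [List.length_cons] at hlen; omega)
        rw [hrec]
        by_cases h0 : 0 ≤ PySem.Chars.rfind ((c :: rest).drop sep.length) sep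
        · -- last occurrence lies in the dropped suffix
          obtain ⟨hocc, hmax⟩ := pv_rfind_spec _ sep hsep h0
          set r := (PySem.Chars.rfind ((c :: rest).drop sep.length) sep).toNat with hr
          have hocc' : sep <+: (c :: rest).drop (sep.length + r) := by
            rw [← List.drop_drop]
            exact hocc
          have hfull : PySem.Chars.rfind (c :: rest) sep = ((sep.length + r : Nat) : Int) := by
            apply pv_rfind_eq _ _ _ hsep hocc'
            intro j hj hpre
            have hjge : sep.length ≤ j := by omega
            apply hmax (j - sep.length) (by omega)
            rw [List.drop_drop]
            have hj2 : sep.length + (j - sep.length) = j := by omega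
            rwa [hj2]
          rw [if_pos h0, hfull, if_pos (by positivity), List.drop_drop]
          congr 2
          omega
        · -- the only occurrence is the prefix at 0
          have hfull : PySem.Chars.rfind (c :: rest) sep = ((0 : Nat) : Int) := by
            apply pv_rfind_eq _ _ _ hsep (by simpa using hppre)
            intro j hj hpre
            rcases Nat.lt_or_ge j sep.length with hlt | hge
            · exact hnb j hlt (by omega)
                (pv_overlap (c :: rest) sep 0 j (by omega) hlt (by simpa using hppre)
                  (by simpa using hpre))
            · apply h0
              rw [pv_rfind_nonneg_iff _ sep hsep]
              apply (PySem.Chars.isIn_iff_infix sep _).mp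
              apply (PySem.Chars.exists_prefix_drop_iff_isIn sep _).mp
              refine ⟨j - sep.length, ?_⟩
              rw [List.drop_drop]
              have hj2 : sep.length + (j - sep.length) = j := by omega
              rwa [hj2]
          rw [if_neg h0, hfull, if_pos (by norm_num)]
          simp
      · rw [if_neg hp]
        have hnpre : ¬ sep <+: (c :: rest) := fun h => hp (List.isPrefixOf_iff_prefix.mpr h)
        have hrec := ih rest (c :: cur) acc (by simp at hlen ⊢; omega)
        rw [hrec]
        by_cases h0 : 0 ≤ PySem.Chars.rfind rest sep
        · obtain ⟨hocc, hmax⟩ := pv_rfind_spec _ sep hsep h0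
          set r := (PySem.Chars.rfind rest sep).toNat with hr
          have hfull : PySem.Chars.rfind (c :: rest) sep = ((r + 1 : Nat) : Int) := by
            apply pv_rfind_eq _ _ _ hsep (by simpa using hocc)
            intro j hj hpre
            cases j with
            | zero => omega
            | succ j' => exact hmax j' (by omega) (by simpa using hpre)
          rw [if_pos h0, hfull, if_pos (by positivity)]
          have hidx : ((r + 1 : Nat) : Int).toNat + sep.length = (r + sep.length) + 1 := by omega
          rw [hidx, List.drop_succ_cons]
        · have hneg : PySem.Chars.rfind (c :: rest) sep = -1 := by
            rw [pv_rfind_neg_iff _ sep hsep, List.infix_cons_iff]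
            rintro (h | h)
            · exact hnpre h
            · exact h0 ((pv_rfind_nonneg_iff rest sep hsep).mpr h)
          rw [if_neg h0, hneg, if_neg (by norm_num)]
          simp

theorem pv_split_last (u p : String) (hp : p.toList ≠ []) (hnb : PvNoBorder p.toList)
    (h0 : 0 ≤ PySem.Chars.rfind u.toList p.toList) :
    (PySem.List.pyGet? ((PySem.Str.split? u p).getD []) (-1)).getD ""
      = String.ofList (u.toList.drop
          ((PySem.Chars.rfind u.toList p.toList).toNat + p.toList.length)) := by
  have hlast := pv_go_last p.toList hp hnb (u.toList.length + 1) u.toList [] [] (by omega)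
  rw [if_pos h0] at hlast
  rw [PySem.Str.split?.eq_1]
  unfold PySem.Chars.split?
  rw [if_neg (by simpa using hp)]
  simp only [Option.map_some, Option.getD_some, PySem.List.pyGet?_neg_one]
  rw [List.getLast?_map]
  unfold PySem.Chars.splitOn
  rw [hlast]
  simp

-- ---- the normalization tail: A's split chain = B's rfind + cut-at-first ----

set_option maxHeartbeats 1600000 in
theorem pv_tail_eq (u : String) :
    (if PySem.Str.isIn "youtu.be/" u then
        "https://www.youtube.com/watch?v=" ++
          ((PySem.Str.split?
              (((PySem.Str.split?
                    ((PySem.List.pyGet? ((PySem.Str.split? u "youtu.be/").getD []) (-1)).getD "")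
                    "?").getD []).headD "")
              "&").getD []).headD ""
      else u)
    = (if PySem.Str.rfind u "youtu.be/" != -1 then
        "https://www.youtube.com/watch?v=" ++
          pvCutAtFirst (PySem.Str.slice u (some (PySem.Str.rfind u "youtu.be/" + 9)) none)
            ["?", "&"]
      else u) := by
  have hsub : ("youtu.be/" : String).toList ≠ [] := by decide
  have hnb : PvNoBorder ("youtu.be/" : String).toList := by
    simp only [PvNoBorder]; decide
  by_cases hocc : ("youtu.be/" : String).toList <:+: u.toList
  · have hr0 : 0 ≤ PySem.Chars.rfind u.toList ("youtu.be/" : String).toList :=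
      (pv_rfind_nonneg_iff _ _ hsub).mpr hocc
    set r := (PySem.Chars.rfind u.toList ("youtu.be/" : String).toList).toNat with hrdef
    have hmap : (["?", "&"] : List String).map String.toList
        = [("?" : String).toList, ("&" : String).toList] := rfl
    have hA : ((PySem.Str.split?
              (((PySem.Str.split?
                    ((PySem.List.pyGet? ((PySem.Str.split? u "youtu.be/").getD []) (-1)).getD "")
                    "?").getD []).headD "")
              "&").getD []).headD ""
        = String.ofList ((u.toList.drop (r + 9)).take
            (pvF (u.toList.drop (r + 9)) [("?" : String).toList, ("&" : String).toList])) := by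
      have h9 : ("youtu.be/" : String).toList.length = 9 := by decide
      have hL : u.toList.drop (r + ("youtu.be/" : String).toList.length)
          = u.toList.drop (r + 9) := by rw [h9]
      rw [pv_split_last u "youtu.be/" hsub hnb hr0, ← hrdef, hL]
      rw [pv_split_head _ "?" (by decide), String.toList_ofList]
      rw [pv_split_head _ "&" (by decide), String.toList_ofList]
      have hfold : pvCut (pvCut (u.toList.drop (r + 9)) ("?" : String).toList) ("&" : String).toList
          = [("?" : String).toList, ("&" : String).toList].foldl pvCut (u.toList.drop (r + 9)) := by
        simp [List.foldl_cons]
      rw [hfold, pv_loop_take [("?" : String).toList, ("&" : String).toList]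
          (by decide) (by simp only [PvCompat]; decide)]
    have hB : pvCutAtFirst (PySem.Str.slice u (some (PySem.Str.rfind u "youtu.be/" + 9)) none)
          ["?", "&"]
        = String.ofList ((u.toList.drop (r + 9)).take
            (pvF (u.toList.drop (r + 9)) [("?" : String).toList, ("&" : String).toList])) := by
      have hslice : (PySem.Str.slice u (some (PySem.Str.rfind u "youtu.be/" + 9)) none).toList
          = u.toList.drop (r + 9) := by
        rw [PySem.Str.toList_slice, PySem.Chars.slice_eq_listSlice, PySem.Str.rfind_eq,
          PySem.List.slice_from _ (by omega)]
        congr 1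
        omega
      rw [pv_cutAtFirst_eq, hslice, hmap]
    rw [if_pos ((PySem.Str.isIn_iff_infix _ _).mpr hocc),
        if_pos (by rw [PySem.Str.rfind_eq]; simp only [bne_iff_ne, ne_eq]; omega),
        hA, hB]
  · have hneg : PySem.Chars.rfind u.toList ("youtu.be/" : String).toList = -1 :=
      (pv_rfind_neg_iff _ _ hsub).mpr hocc
    rw [if_neg (fun h => hocc ((PySem.Str.isIn_iff_infix _ _).mp h)),
        if_neg (by rw [PySem.Str.rfind_eq, hneg]; simp)]

-- ===== VERDICT (by name: the statement is the Claim_ definition above) =====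
theorem clean_youtube_url_spec : Claim_equal_clean_youtube_url := by
  intro url _
  unfold Spec_clean_youtube_url
  simp only [clean_youtube_url, clean_youtube_url_alt]
  rw [pv_foldl_string pvParams (by decide) (PySem.Str.strip url)]
  rw [pv_loop_take (pvParams.map String.toList) pv_ne_params pv_compat_params]
  rw [pv_cutAtFirst_eq (PySem.Str.strip url) pvParams]
  exact pv_tail_eq _
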